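-- pv_equiv track=rewrite | github.com/nicolelu/esign | scripts/evaluate_field_detection.py | _roles_match
-- ===== SOURCE A (Python) =====
-- def _roles_match(detected_role: str, ground_truth_role: str) -> bool:
--     """Check if detected role matches ground truth role."""
--     detected = detected_role.lower()
--     gt = ground_truth_role.lower()
--
--     # Exact match
--     if detected == gt:
--         return True
--
--     # Role synonyms/equivalences
--     equivalences = {
--         # Client-like roles
--         ("client", "buyer", "customer", "purchaser"): True,
--         # Company-like roles
--         ("company", "employer", "vendor", "seller"): True,
--         # Contractor-like roles
--         ("contractor", "employee", "worker", "consultant"): True,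
--         # Property roles
--         ("landlord", "owner", "lessor"): True,
--         ("tenant", "renter", "lessee"): True,
--         # Legacy signer_1/signer_2 mapping
--         ("signer_1", "client", "contractor", "tenant", "buyer", "borrower", "employee"): True,
--         ("signer_2", "company", "landlord", "seller", "lender"): True,
--     }
--
--     for group in equivalences:
--         if detected in group and gt in group:
--             return True
--
--     return False
-- ===== SOURCE B (Python) =====
-- # Each role is mapped once to a bitmask of the equivalence groups containing it
-- # (bit i = group i of the original table); two distinct roles match iff their
-- # masks share a bit.
-- _ROLE_MASKS = {
--     "client": 0b0100001, "buyer": 0b0100001, "customer": 0b0000001, "purchaser": 0b0000001,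
--     "company": 0b1000010, "employer": 0b0000010, "vendor": 0b0000010, "seller": 0b1000010,
--     "contractor": 0b0100100, "employee": 0b0100100, "worker": 0b0000100, "consultant": 0b0000100,
--     "landlord": 0b1001000, "owner": 0b0001000, "lessor": 0b0001000,
--     "tenant": 0b0110000, "renter": 0b0010000, "lessee": 0b0010000,
--     "signer_1": 0b0100000, "borrower": 0b0100000,
--     "signer_2": 0b1000000, "lender": 0b1000000,
-- }
--
--
-- def _roles_match(detected_role: str, ground_truth_role: str) -> bool:
--     """Check if detected role matches ground truth role."""
--     detected = detected_role.lower()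
--     gt = ground_truth_role.lower()
--     if detected == gt:
--         return True
--     return _ROLE_MASKS.get(detected, 0) & _ROLE_MASKS.get(gt, 0) != 0
-- ===== Notes on version B (the rewrite author's own statement) =====
-- stated objective: alternative
-- what changed: Replaces the per-call linear scan over the list of equivalence groups by a flat precomputed table mapping each role to a bitmask of the groups containing it; after the exact-match guard, matching is two dict lookups and one bitwise AND tested against zero.
import Mathlib
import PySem

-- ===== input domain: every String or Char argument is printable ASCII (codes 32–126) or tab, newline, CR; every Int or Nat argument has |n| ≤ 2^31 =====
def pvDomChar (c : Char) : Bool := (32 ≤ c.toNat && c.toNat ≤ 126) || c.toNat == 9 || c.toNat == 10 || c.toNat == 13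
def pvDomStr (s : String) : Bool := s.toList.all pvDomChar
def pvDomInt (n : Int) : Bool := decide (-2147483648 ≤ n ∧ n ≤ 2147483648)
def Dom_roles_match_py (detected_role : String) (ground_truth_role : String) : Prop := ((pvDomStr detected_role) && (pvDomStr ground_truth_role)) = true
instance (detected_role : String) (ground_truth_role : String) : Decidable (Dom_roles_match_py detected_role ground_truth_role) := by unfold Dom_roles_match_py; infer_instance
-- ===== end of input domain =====

-- B replaces A's per-call scan over the equivalence groups by a flat table mapping
-- each role to a bitmask of the groups containing it; two roles match iff the
-- bitwise AND of their masks is nonzero.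

-- ===== PORT A =====
-- A's dict literal with tuple keys and value True is only iterated over its keys,
-- so it is ported as the list of groups in insertion order.
def pvGroupsA : List (List String) :=
  [["client", "buyer", "customer", "purchaser"],
   ["company", "employer", "vendor", "seller"],
   ["contractor", "employee", "worker", "consultant"],
   ["landlord", "owner", "lessor"],
   ["tenant", "renter", "lessee"],
   ["signer_1", "client", "contractor", "tenant", "buyer", "borrower", "employee"],
   ["signer_2", "company", "landlord", "seller", "lender"]]

-- the 'for group in equivalences:' loop
def pvLoopA : List (List String) → String → String → Bool
  | [], _, _ => false
  | grp :: rest, d, g => if grp.contains d && grp.contains g then true else pvLoopA rest d g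

def roles_match_py (detected_role : String) (ground_truth_role : String) : Bool :=
  let detected := PySem.Str.lower detected_role
  let gt := PySem.Str.lower ground_truth_role
  if detected == gt then true
  else pvLoopA pvGroupsA detected gt

-- ===== PORT B =====
-- _ROLE_MASKS: role -> bitmask of equivalence groups (bit i = group i)
def pvRoleMasks : PySem.Dict String Int :=
  PySem.Dict.ofList
    [("client", 33), ("buyer", 33), ("customer", 1), ("purchaser", 1),
     ("company", 66), ("employer", 2), ("vendor", 2), ("seller", 66),
     ("contractor", 36), ("employee", 36), ("worker", 4), ("consultant", 4),
     ("landlord", 72), ("owner", 8), ("lessor", 8),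
     ("tenant", 48), ("renter", 16), ("lessee", 16),
     ("signer_1", 32), ("borrower", 32),
     ("signer_2", 64), ("lender", 64)]

def roles_match_py_alt (detected_role : String) (ground_truth_role : String) : Bool :=
  let detected := PySem.Str.lower detected_role
  let gt := PySem.Str.lower ground_truth_role
  if detected == gt then true
  else PySem.Int.band (pvRoleMasks.getD detected 0) (pvRoleMasks.getD gt 0) != 0

-- ===== PRECONDITION & SPEC =====
def Spec_roles_match_py (detected_role : String) (ground_truth_role : String) (out : Bool) : Prop := out = roles_match_py_alt detected_role ground_truth_role
instance (detected_role : String) (ground_truth_role : String) (out : Bool) : Decidable (Spec_roles_match_py detected_role ground_truth_role out) := by unfold Spec_roles_match_py; infer_instance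

-- ===== CLAIM (what is proved, stated in full; the proofs are below) =====
def Claim_equal_roles_match_py : Prop := ∀ (detected_role : String) (ground_truth_role : String), Dom_roles_match_py detected_role ground_truth_role → Spec_roles_match_py detected_role ground_truth_role (roles_match_py detected_role ground_truth_role)

-- ===== LEMMAS AND PROOFS =====

-- the role strings carrying a mask, in the table's insertion order
def pvAllRoles : List String :=
  ["client", "buyer", "customer", "purchaser", "company", "employer", "vendor", "seller",
   "contractor", "employee", "worker", "consultant", "landlord", "owner", "lessor",
   "tenant", "renter", "lessee", "signer_1", "borrower", "signer_2", "lender"]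

theorem pvKeys_eq : pvRoleMasks.keys = pvAllRoles := by decide

theorem pvGetD_not_mem (x : String) (hx : x ∉ pvAllRoles) :
    pvRoleMasks.getD x 0 = 0 := by
  apply PySem.Dict.getD_of_not_contains
  rw [PySem.Dict.contains_eq_decide_mem_keys, pvKeys_eq]
  simpa using hx

theorem pvLoop_false_left (y : String) (gs : List (List String)) (x : String)
    (h : ∀ grp ∈ gs, grp.contains x = false) : pvLoopA gs x y = false := by
  induction gs with
  | nil => rfl
  | cons grp rest ih =>
      have hc : grp.contains x = false := h grp (by simp)
      simp only [pvLoopA, hc, Bool.false_and]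
      exact ih (fun g hg => h g (by simp [hg]))

theorem pvLoop_false_right (x : String) (gs : List (List String)) (y : String)
    (h : ∀ grp ∈ gs, grp.contains y = false) : pvLoopA gs x y = false := by
  induction gs with
  | nil => rfl
  | cons grp rest ih =>
      have hc : grp.contains y = false := h grp (by simp)
      simp only [pvLoopA, hc, Bool.and_false]
      exact ih (fun g hg => h g (by simp [hg]))

theorem pvNot_mem_contains (x : String) (hx : x ∉ pvAllRoles) :
    ∀ grp ∈ pvGroupsA, grp.contains x = false := by
  intro grp hgrp
  simp only [pvAllRoles, List.mem_cons, List.not_mem_nil, or_false, not_or] at hx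
  obtain ⟨h1,h2,h3,h4,h5,h6,h7,h8,h9,h10,h11,h12,h13,h14,h15,h16,h17,h18,h19,h20,h21,h22⟩ := hx
  simp only [pvGroupsA, List.mem_cons, List.not_mem_nil, or_false] at hgrp
  rcases hgrp with h|h|h|h|h|h|h <;> subst h <;>
    simp [List.contains_eq_mem, h1,h2,h3,h4,h5,h6,h7,h8,h9,h10,h11,h12,h13,h14,h15,h16,h17,h18,h19,h20,h21,h22]

set_option maxRecDepth 8192 in
theorem pvMain (x y : String) :
    pvLoopA pvGroupsA x y =
      (PySem.Int.band (pvRoleMasks.getD x 0) (pvRoleMasks.getD y 0) != 0) := by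
  by_cases hx : x ∈ pvAllRoles
  · by_cases hy : y ∈ pvAllRoles
    · fin_cases hx <;> fin_cases hy <;> decide
    · rw [pvLoop_false_right x pvGroupsA y (pvNot_mem_contains y hy), pvGetD_not_mem y hy]
      fin_cases hx <;> decide
  · rw [pvLoop_false_left y pvGroupsA x (pvNot_mem_contains x hx), pvGetD_not_mem x hx]
    by_cases hy : y ∈ pvAllRoles
    · fin_cases hy <;> decide
    · rw [pvGetD_not_mem y hy]; decide

-- ===== VERDICT (by name: the statement is the Claim_ definition above) =====
theorem roles_match_py_spec : Claim_equal_roles_match_py := by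
  intro d g _
  unfold Spec_roles_match_py roles_match_py roles_match_py_alt
  by_cases h : PySem.Str.lower d == PySem.Str.lower g
  · simp [h]
  · simp only [h, Bool.false_eq_true, if_false]
    exact pvMain _ _
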